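-- pv_equiv track=rewrite | github.com/ovillegasb/WABgen | wabgen/utils/allocate.py | extra_el
-- ===== SOURCE A (Python) =====
-- def extra_el(l2,l):
--    """idea is that l2 contains 1 extra element than l
--    and want to return that
--    e.g. l2 = [0,1,1,2], l=[0,1,2] want to return 1"""
--    l2 = [x for x in l2]
--    for x in l:
--       try:
--          i = l2.index(x)
--          del(l2[i])
--       except:
--          return None
--    assert len(l2) == 1
--    return l2[0]
-- ===== SOURCE B (Python) =====
-- def extra_el(l2, l):
--     """idea is that l2 contains 1 extra element than l
--     and want to return that"""
--     a = sorted(l2)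
--     b = sorted(l)
--     extra = []
--     i = j = 0
--     while i < len(a) and j < len(b):
--         if a[i] == b[j]:
--             i += 1
--             j += 1
--         elif a[i] < b[j]:
--             extra.append(a[i])
--             i += 1
--         else:
--             return None
--     if j < len(b):
--         return None
--     extra.extend(a[i:])
--     assert len(extra) == 1
--     return extra[0]
-- ===== Notes on version B (the rewrite author's own statement) =====
-- stated objective: alternative
-- what changed: Replaces the per-element list.index/del scan over a mutable copy with sorting both lists once and a single two-pointer merge walk that collects the surplus elements.
import Mathlib
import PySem

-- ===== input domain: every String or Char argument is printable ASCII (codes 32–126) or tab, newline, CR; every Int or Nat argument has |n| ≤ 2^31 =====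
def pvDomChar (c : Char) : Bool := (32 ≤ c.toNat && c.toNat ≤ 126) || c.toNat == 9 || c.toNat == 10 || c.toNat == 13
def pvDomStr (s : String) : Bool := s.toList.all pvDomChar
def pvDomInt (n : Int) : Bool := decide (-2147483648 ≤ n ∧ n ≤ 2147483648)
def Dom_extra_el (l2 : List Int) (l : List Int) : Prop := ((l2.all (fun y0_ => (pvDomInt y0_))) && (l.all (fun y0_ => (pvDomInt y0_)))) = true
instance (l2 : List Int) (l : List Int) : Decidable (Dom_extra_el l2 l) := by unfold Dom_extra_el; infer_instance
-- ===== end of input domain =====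

-- B sorts both lists once and does a single two-pointer merge walk instead of A's
-- per-element list.index/del scan; return values agree on Pre_ (proved below).
-- A's assert (and B's) raise outside Pre_; Pre_ excludes exactly those inputs.

-- ===== PORT A =====
-- 'for x in l: i = l2.index(x); del l2[i]' — returns None on ValueError from index
def extraElLoopA : List Int → List Int → Option (List Int)
  | [], cur => some cur
  | x :: rest, cur =>
    match PySem.List.index? cur x with
    | none => none
    | some i =>
      match PySem.List.pop? cur (Int.ofNat i) with
      | none => none
      | some (_, cur') => extraElLoopA rest cur'

def extra_el (l2 : List Int) (l : List Int) : Option Int :=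
  match extraElLoopA l l2 with
  | none => none
  | some cur =>
    -- 'assert len(l2) == 1' raises outside Pre_; 'return l2[0]'
    if cur.length = 1 then PySem.List.pyGet? cur 0 else none

-- ===== PORT B =====
-- two-pointer merge walk over the two sorted lists (indices i, j become list tails)
def extraElMerge : List Int → List Int → List Int → Option (List Int)
  | a, [], extra => some (extra ++ a)          -- j == len(b): extend extra with a[i:]
  | [], _ :: _, _ => none                      -- loop ends with j < len(b)
  | x :: a, y :: b, extra =>
    if x = y then extraElMerge a b extra
    else if x < y then extraElMerge a (y :: b) (extra ++ [x])
    else none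
  termination_by a b _ => a.length + b.length

def extra_el_alt (l2 : List Int) (l : List Int) : Option Int :=
  let a := PySem.List.sorted l2 (fun x => x) false
  let b := PySem.List.sorted l (fun x => x) false
  match extraElMerge a b [] with
  | none => none
  | some extra =>
    -- 'assert len(extra) == 1' raises outside Pre_; 'return extra[0]'
    if extra.length = 1 then PySem.List.pyGet? extra 0 else none

-- ===== PRECONDITION & SPEC =====
-- Pre_ excludes exactly the inputs on which A's 'assert len(l2) == 1' raises
-- AssertionError: those where l is a sub-multiset of l2 but len(l2) ≠ len(l) + 1
-- (B's assert raises on exactly the same inputs).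
def Pre_extra_el (l2 : List Int) (l : List Int) : Prop :=
  (∀ x ∈ l, l.count x ≤ l2.count x) → l2.length = l.length + 1
instance (l2 : List Int) (l : List Int) : Decidable (Pre_extra_el l2 l) := by
  unfold Pre_extra_el; infer_instance

def pvWitness_extra_el : List Int × List Int := ([0, 1, 1, 2], [0, 1, 2])

def Spec_extra_el (l2 : List Int) (l : List Int) (out : Option Int) : Prop := out = extra_el_alt l2 l
instance (l2 : List Int) (l : List Int) (out : Option Int) : Decidable (Spec_extra_el l2 l out) := by unfold Spec_extra_el; infer_instance

-- ===== CLAIM (what is proved, stated in full; the proofs are below) =====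
def Claim_equal_extra_el : Prop := ∀ (l2 : List Int) (l : List Int), Dom_extra_el l2 l → Pre_extra_el l2 l → Spec_extra_el l2 l (extra_el l2 l)

-- ===== LEMMAS AND PROOFS =====

-- A's loop, one step: when x ∈ cur, index?+pop? succeed and remove one copy of x
theorem loopA_cons (x : Int) (rest cur : List Int) (hx : x ∈ cur) :
    ∃ cur', extraElLoopA (x :: rest) cur = extraElLoopA rest cur' ∧
      x ::ₘ (cur' : Multiset Int) = (cur : Multiset Int) := by
  have hs : (PySem.List.index? cur x).isSome := (PySem.List.index?_isSome_iff cur x).mpr hx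
  obtain ⟨i, hi⟩ := Option.isSome_iff_exists.mp hs
  obtain ⟨pre, suf, hcur, hlen, -⟩ := (PySem.List.index?_eq_some_iff cur x i).mp hi
  have hilt : i < cur.length := by
    subst hcur; simp [← hlen]
  have hpop : PySem.List.pop? cur (Int.ofNat i)
      = some (cur[i], cur.eraseIdx i) := by
    exact_mod_cast PySem.List.pop?_natCast cur i hilt
  refine ⟨cur.eraseIdx i, ?_, ?_⟩
  · simp only [extraElLoopA, hi, hpop]
  · subst hcur
    rw [← hlen, List.eraseIdx_append_of_length_le (le_refl pre.length)]
    simp only [Nat.sub_self, List.eraseIdx_cons_zero]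
    rw [Multiset.cons_coe, Multiset.coe_eq_coe]
    exact List.perm_middle.symm

theorem loopA_none_iff (l cur : List Int) :
    extraElLoopA l cur = none ↔ ¬ ((l : Multiset Int) ≤ (cur : Multiset Int)) := by
  induction l generalizing cur with
  | nil => simp [extraElLoopA]
  | cons x rest ih =>
    by_cases hx : x ∈ cur
    · obtain ⟨cur', heq, hco⟩ := loopA_cons x rest cur hx
      rw [heq, ih]
      rw [← hco, ← Multiset.cons_coe, Multiset.cons_le_cons_iff]
    · have hidx : PySem.List.index? cur x = none := (PySem.List.index?_eq_none_iff cur x).mpr hx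
      have hnone : extraElLoopA (x :: rest) cur = none := by
        simp only [extraElLoopA, hidx]
      simp only [hnone, true_iff]
      intro hle
      have hmem : x ∈ (cur : Multiset Int) := Multiset.subset_of_le hle (by simp)
      exact hx (by simpa using hmem)

theorem loopA_eq_some (l cur r : List Int) (h : extraElLoopA l cur = some r) :
    (r : Multiset Int) = (cur : Multiset Int) - (l : Multiset Int) := by
  induction l generalizing cur with
  | nil => simp [extraElLoopA] at h; simp [h]
  | cons x rest ih =>
    by_cases hx : x ∈ cur
    · obtain ⟨cur', heq, hco⟩ := loopA_cons x rest cur hx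
      rw [heq] at h
      rw [ih cur' h, ← hco]
      simp
    · have hidx : PySem.List.index? cur x = none := (PySem.List.index?_eq_none_iff cur x).mpr hx
      simp only [extraElLoopA, hidx] at h
      exact absurd h (by simp)

-- B's merge: characterisation via multisets, under sortedness of both inputs
theorem merge_spec (a b extra : List Int)
    (ha : a.Pairwise (· ≤ ·)) (hb : b.Pairwise (· ≤ ·)) :
    (∀ r, extraElMerge a b extra = some r →
        ((b : Multiset Int) ≤ (a : Multiset Int)) ∧
        (r : Multiset Int) = (extra : Multiset Int) + ((a : Multiset Int) - (b : Multiset Int))) ∧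
    (extraElMerge a b extra = none → ¬ ((b : Multiset Int) ≤ (a : Multiset Int))) := by
  fun_induction extraElMerge a b extra with
  | case1 a extra =>
    refine ⟨fun r hr => ?_, fun h => by simp at h⟩
    cases hr
    simp
  | case2 y b extra =>
    refine ⟨fun r hr => by simp at hr, fun _ hle => ?_⟩
    have := Multiset.card_le_card hle
    simp at this
  | case3 a y b extra ih =>
    obtain ⟨ihs, ihn⟩ := ih (List.pairwise_cons.mp ha).2 (List.pairwise_cons.mp hb).2
    constructor
    · intro r hr
      obtain ⟨hle, hval⟩ := ihs r hr
      constructor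
      · rw [← Multiset.cons_coe y b, ← Multiset.cons_coe y a]
        exact Multiset.cons_le_cons y hle
      · rw [hval]
        congr 1
        rw [← Multiset.cons_coe y b, ← Multiset.cons_coe y a,
          Multiset.sub_cons, Multiset.erase_cons_head]
    · intro h hle
      apply ihn h
      rw [← Multiset.cons_coe y b, ← Multiset.cons_coe y a] at hle
      exact (Multiset.cons_le_cons_iff y).mp hle
  | case4 x a y b extra hne hlt ih =>
    obtain ⟨ihs, ihn⟩ := ih (List.pairwise_cons.mp ha).2 hb
    have hxnot : x ∉ y :: b := by
      intro hmem
      rcases List.mem_cons.mp hmem with heq | hmem'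
      · exact hne heq
      · have := (List.pairwise_cons.mp hb).1 x hmem'
        omega
    have hcnt : Multiset.count x ((y :: b : List Int) : Multiset Int) = 0 := by
      rw [Multiset.count_eq_zero]
      simpa using hxnot
    have hkey : ∀ s : Multiset Int,
        ((y :: b : List Int) : Multiset Int) ≤ x ::ₘ s ↔
        ((y :: b : List Int) : Multiset Int) ≤ s := by
      intro s
      constructor
      · intro hle
        rw [Multiset.le_iff_count] at hle ⊢
        intro c
        have hc := hle c
        by_cases hcx : c = x
        · subst hcx
          simp [hcnt]
        · simpa [Multiset.count_cons, hcx] using hc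
      · intro hle
        exact hle.trans (Multiset.le_cons_self s x)
    have hsub : ((x :: a : List Int) : Multiset Int) - ((y :: b : List Int) : Multiset Int)
        = x ::ₘ ((a : Multiset Int) - ((y :: b : List Int) : Multiset Int)) := by
      rw [← Multiset.cons_coe x a]
      ext c
      simp only [Multiset.count_sub, Multiset.count_cons]
      by_cases hcx : c = x
      · subst hcx
        rw [hcnt]
        omega
      · simp [hcx]
    constructor
    · intro r hr
      obtain ⟨hle, hval⟩ := ihs r hr
      refine ⟨?_, ?_⟩
      · rw [← Multiset.cons_coe x a]
        exact (hkey _).mpr hle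
      · calc (r : Multiset Int)
            = ((extra ++ [x] : List Int) : Multiset Int)
              + ((a : Multiset Int) - ((y :: b : List Int) : Multiset Int)) := hval
          _ = (extra : Multiset Int)
              + ({x} + ((a : Multiset Int) - ((y :: b : List Int) : Multiset Int))) := by
              simp
          _ = (extra : Multiset Int)
              + (x ::ₘ ((a : Multiset Int) - ((y :: b : List Int) : Multiset Int))) := by
              rw [Multiset.singleton_add]
          _ = (extra : Multiset Int)
              + (((x :: a : List Int) : Multiset Int) - ((y :: b : List Int) : Multiset Int)) := by
              rw [hsub]
    · intro h hle
      apply ihn h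
      rw [← Multiset.cons_coe x a] at hle
      exact (hkey _).mp hle
  | case5 x a y b extra hne hnlt =>
    refine ⟨fun r hr => by simp at hr, fun _ hle => ?_⟩
    have hymem : y ∈ x :: a := by
      have hm : y ∈ ((x :: a : List Int) : Multiset Int) := Multiset.subset_of_le hle (by simp)
      simpa using hm
    rcases List.mem_cons.mp hymem with heq | hmem
    · omega
    · have := (List.pairwise_cons.mp ha).1 y hmem
      omega

-- the count-based Pre_ condition is exactly multiset ≤
theorem count_le_iff (l l2 : List Int) :
    (∀ x ∈ l, l.count x ≤ l2.count x) ↔ (l : Multiset Int) ≤ (l2 : Multiset Int) := by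
  rw [Multiset.le_iff_count]
  constructor
  · intro h c
    by_cases hc : c ∈ l
    · simpa using h c hc
    · simp [List.count_eq_zero_of_not_mem hc]
  · intro h x _
    simpa using h x

-- ===== VERDICT (by name: the statement is the Claim_ definition above) =====
theorem extra_el_spec : Claim_equal_extra_el := by
  intro l2 l _ hpre
  unfold Spec_extra_el
  have hEA : extra_el l2 l = (match extraElLoopA l l2 with
      | none => none
      | some cur => if cur.length = 1 then PySem.List.pyGet? cur 0 else none) := rfl
  have hEB : extra_el_alt l2 l = (match extraElMerge (PySem.List.sorted l2 (fun x => x) false)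
        (PySem.List.sorted l (fun x => x) false) [] with
      | none => none
      | some ex => if ex.length = 1 then PySem.List.pyGet? ex 0 else none) := rfl
  have hpa : (PySem.List.sorted l2 (fun x => x) false).Pairwise (· ≤ ·) := by
    simpa using PySem.List.sorted_pairwise (xs := l2) (key := fun x => x)
  have hpb : (PySem.List.sorted l (fun x => x) false).Pairwise (· ≤ ·) := by
    simpa using PySem.List.sorted_pairwise (xs := l) (key := fun x => x)
  have hca : ((PySem.List.sorted l2 (fun x => x) false : List Int) : Multiset Int)
      = (l2 : Multiset Int) :=
    Multiset.coe_eq_coe.mpr (PySem.List.sorted_perm l2 (fun x => x) false)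
  have hcb : ((PySem.List.sorted l (fun x => x) false : List Int) : Multiset Int)
      = (l : Multiset Int) :=
    Multiset.coe_eq_coe.mpr (PySem.List.sorted_perm l (fun x => x) false)
  obtain ⟨msome, mnone⟩ := merge_spec (PySem.List.sorted l2 (fun x => x) false)
    (PySem.List.sorted l (fun x => x) false) [] hpa hpb
  by_cases hle : (l : Multiset Int) ≤ (l2 : Multiset Int)
  · -- both succeed; both results have multiset l2 - l, which has card 1
    have hlen : l2.length = l.length + 1 := hpre ((count_le_iff l l2).mpr hle)
    cases hA : extraElLoopA l l2 with
    | none => exact absurd hle ((loopA_none_iff l l2).mp hA)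
    | some r =>
      have hrval := loopA_eq_some l l2 r hA
      cases hB : extraElMerge (PySem.List.sorted l2 (fun x => x) false)
          (PySem.List.sorted l (fun x => x) false) [] with
      | none => exact absurd (by rw [hca, hcb]; exact hle) (mnone hB)
      | some ex =>
        obtain ⟨-, hexval⟩ := msome ex hB
        rw [hca, hcb] at hexval
        simp only [Multiset.coe_nil, zero_add] at hexval
        have hcard : Multiset.card ((l2 : Multiset Int) - (l : Multiset Int)) = 1 := by
          rw [Multiset.card_sub hle]
          simp [hlen]
        have hrlen : r.length = 1 := by
          have : Multiset.card (r : Multiset Int) = 1 := by rw [hrval]; exact hcard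
          simpa using this
        have hexlen : ex.length = 1 := by
          have : Multiset.card (ex : Multiset Int) = 1 := by rw [hexval]; exact hcard
          simpa using this
        obtain ⟨d, hd⟩ := List.length_eq_one_iff.mp hrlen
        obtain ⟨e, he⟩ := List.length_eq_one_iff.mp hexlen
        have hde : d = e := by
          have : ((([d] : List Int)) : Multiset Int) = (([e] : List Int) : Multiset Int) := by
            rw [← hd, ← he, hrval, hexval]
          simpa using this
        subst hde
        rw [hEA, hEB, hA, hB]
        simp [hd, he]
  · -- l not a sub-multiset of l2: both return none
    have hA : extraElLoopA l l2 = none := (loopA_none_iff l l2).mpr hle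
    have hB : extraElMerge (PySem.List.sorted l2 (fun x => x) false)
        (PySem.List.sorted l (fun x => x) false) [] = none := by
      cases hB : extraElMerge (PySem.List.sorted l2 (fun x => x) false)
          (PySem.List.sorted l (fun x => x) false) [] with
      | none => rfl
      | some ex =>
        obtain ⟨h, -⟩ := msome ex hB
        rw [hca, hcb] at h
        exact absurd h hle
    rw [hEA, hEB, hA, hB]
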